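-- pv_equiv track=rewrite | github.com/thaheer-uzamaki/Code | First reverse.py | first_reverse
-- ===== SOURCE A (Python) =====
-- def first_reverse(string):
--     character=''
--     for char in string[::-1]:
--         character+=char
--     res=character+token
--     res_list=list(res)
--     for i in range(3,len(res),4):
--         res_list[i]='-'
--     res=''.join(res_list)
--     return res
--
-- token='abdef'
-- ===== SOURCE B (Python) =====
-- token = 'abdef'
--
--
-- def first_reverse(string):
--     # Build the reversed string plus the token, then emit it in groups
--     # of four characters: each full group contributes its first three
--     # characters followed by a dash; a shorter trailing group is kept
--     # unchanged.
--     res = string[::-1] + token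
--     n = len(res)
--     out = []
--     i = 0
--     while n - i >= 4:
--         out.append(res[i:i+3] + '-')
--         i += 4
--     out.append(res[i:])
--     return ''.join(out)
-- ===== Notes on version B (the rewrite author's own statement) =====
-- stated objective: alternative
-- what changed: Instead of materialising the whole string as a char list and overwriting every fourth position in place, B walks the reversed string plus token in groups of four with an advancing index, emitting each full group with its last character replaced by a dash and the trailing partial group unchanged, then joins the pieces.
import Mathlib
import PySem

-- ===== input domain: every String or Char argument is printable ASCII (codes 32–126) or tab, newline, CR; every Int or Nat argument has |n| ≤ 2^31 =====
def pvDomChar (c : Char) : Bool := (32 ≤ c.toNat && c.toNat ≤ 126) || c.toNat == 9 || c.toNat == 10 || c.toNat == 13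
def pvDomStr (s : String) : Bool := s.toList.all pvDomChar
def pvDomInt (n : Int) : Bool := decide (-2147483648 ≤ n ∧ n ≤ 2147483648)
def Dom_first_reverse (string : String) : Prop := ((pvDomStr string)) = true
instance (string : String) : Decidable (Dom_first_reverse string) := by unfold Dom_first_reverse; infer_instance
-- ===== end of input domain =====

-- B restates A's per-index mutation loop as a single pass over chunks of four; objective: alternative decomposition, same cost.

-- module-level constant `token = 'abdef'` shared by both versions
def pyToken : String := "abdef"

-- ===== PORT A =====
def first_reverse (string : String) : String :=
  -- character = ''; for char in string[::-1]: character += char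
  let character : List Char :=
    ((PySem.Str.slice? string none none (-1)).getD "").toList.foldl
      (fun acc c => acc ++ [c]) []
  -- res = character + token
  let res : List Char := character ++ pyToken.toList
  -- res_list = list(res); for i in range(3, len(res), 4): res_list[i] = '-'
  let resList : List Char :=
    (PySem.List.pyRange 3 (res.length : Int) 4).foldl
      (fun (l : List Char) (i : Int) => l.set i.toNat '-') res
  -- res = ''.join(res_list)
  String.ofList resList

-- ===== PORT B =====
-- while n - i >= 4: out.append(res[i:i+3] + '-'); i += 4   then out.append(res[i:])
def pvChunksB (res : List Char) (i : Int) (out : List (List Char)) : List (List Char) :=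
  if 4 ≤ (res.length : Int) - i then
    pvChunksB res (i + 4) (out ++ [PySem.List.slice res (some i) (some (i + 3)) ++ ['-']])
  else
    out ++ [PySem.List.slice res (some i) none]
termination_by ((res.length : Int) - i).toNat
decreasing_by omega

def first_reverse_alt (string : String) : String :=
  let res : List Char := string.toList.reverse ++ pyToken.toList
  String.ofList (PySem.Chars.join [] (pvChunksB res 0 []))

-- ===== PRECONDITION & SPEC =====
def Spec_first_reverse (string : String) (out : String) : Prop := out = first_reverse_alt string
instance (string : String) (out : String) : Decidable (Spec_first_reverse string out) := by unfold Spec_first_reverse; infer_instance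

-- ===== CLAIM (what is proved, stated in full; the proofs are below) =====
def Claim_equal_first_reverse : Prop := ∀ (string : String), Dom_first_reverse string → Spec_first_reverse string (first_reverse string)

-- ===== LEMMAS AND PROOFS =====

-- proof-side helper: the chunk loop phrased on the remaining suffix instead of an index
def pvDash (rest : List Char) (out : List (List Char)) : List (List Char) :=
  if 4 ≤ rest.length then
    pvDash (rest.drop 4) (out ++ [rest.take 3 ++ ['-']])
  else
    out ++ [rest]
termination_by rest.length
decreasing_by simp; omega

lemma pvChunksB_eq_dash : ∀ (m : Nat) (res : List Char) (i : Nat), res.length - i = m →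
    ∀ out, pvChunksB res (i : Int) out = pvDash (res.drop i) out := by
  intro m
  induction m using Nat.strong_induction_on with
  | _ m ih =>
    intro res i hm out
    by_cases h : 4 ≤ res.length - i
    · have hInt : 4 ≤ (res.length : Int) - (i : Int) := by omega
      have hNat : 4 ≤ (res.drop i).length := by simp; omega
      rw [pvChunksB, if_pos hInt, pvDash, if_pos hNat]
      have hsl : PySem.List.slice res (some (i : Int)) (some ((i : Int) + 3))
          = (res.drop i).take 3 := by
        have := PySem.List.slice_natCast_add res i 3
        simpa using this
      have hi4 : (i : Int) + 4 = ((i + 4 : Nat) : Int) := by push_cast; ring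
      rw [hsl, hi4, ih (res.length - (i + 4)) (by omega) res (i + 4) rfl, List.drop_drop]
    · have hInt : ¬ 4 ≤ (res.length : Int) - (i : Int) := by omega
      have hNat : ¬ 4 ≤ (res.drop i).length := by simp; omega
      rw [pvChunksB, if_neg hInt, pvDash, if_neg hNat, PySem.List.slice_from_natCast]

lemma pvDash_acc : ∀ (n : Nat) (rest : List Char), rest.length = n →
    ∀ out, pvDash rest out = out ++ pvDash rest [] := by
  intro n
  induction n using Nat.strong_induction_on with
  | _ n ih =>
    intro rest hlen out
    by_cases h : 4 ≤ rest.length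
    · conv_lhs => rw [pvDash]
      conv_rhs => rw [pvDash]
      rw [if_pos h, if_pos h, List.nil_append,
        ih (rest.drop 4).length (by simp; omega) _ rfl (out ++ [rest.take 3 ++ ['-']]),
        ih (rest.drop 4).length (by simp; omega) _ rfl [rest.take 3 ++ ['-']]]
      simp
    · conv_lhs => rw [pvDash]
      conv_rhs => rw [pvDash]
      rw [if_neg h, if_neg h]
      simp

lemma join_nil_cons (p : List Char) (ps : List (List Char)) :
    PySem.Chars.join [] (p :: ps) = p ++ PySem.Chars.join [] ps := by
  cases ps with
  | nil => simp [PySem.Chars.join_singleton, PySem.Chars.join_nil]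
  | cons q rest => simp [PySem.Chars.join_cons_cons]

lemma pyRange4_nil (n : Int) (h : n ≤ 3) : PySem.List.pyRange 3 n 4 = [] := by
  rw [PySem.List.pyRange_of_pos 3 n (by norm_num)]
  simp [show ¬ (3:Int) < n by omega]

lemma pyRange4_step (n : Int) (h : 4 ≤ n) :
    PySem.List.pyRange 3 n 4 = 3 :: (PySem.List.pyRange 3 (n - 4) 4).map (· + 4) := by
  rw [PySem.List.pyRange_of_pos 3 n (by norm_num),
    PySem.List.pyRange_of_pos 3 (n - 4) (by norm_num)]
  have hN : (if (3:Int) < n then ((n - 3 + 4 - 1) / 4).toNat else 0)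
      = (if (3:Int) < n - 4 then ((n - 4 - 3 + 4 - 1) / 4).toNat else 0) + 1 := by
    split_ifs <;> omega
  rw [hN, List.range_succ_eq_map, List.map_cons, List.map_map, List.map_map]
  simp only [Nat.cast_zero, mul_zero, add_zero]
  refine congrArg _ ?_
  apply List.map_congr_left
  intro k _
  simp [Function.comp, Nat.succ_eq_add_one]
  ring

lemma foldl_set_shift (L : List Int) (hL : ∀ i ∈ L, 0 ≤ i) (a b c d : Char) (t : List Char) :
    (L.map (· + 4)).foldl (fun (l : List Char) (i : Int) => l.set i.toNat '-') (a::b::c::d::t)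
      = a::b::c::d:: L.foldl (fun (l : List Char) (i : Int) => l.set i.toNat '-') t := by
  induction L generalizing t with
  | nil => simp
  | cons x xs ih =>
      have hx : 0 ≤ x := hL x (by simp)
      have hset : (a::b::c::d::t).set (x + 4).toNat '-' = a::b::c::d::(t.set x.toNat '-') := by
        have hx4 : (x + 4).toNat = x.toNat + 4 := by omega
        simp [hx4, List.set]
      simp only [List.map_cons, List.foldl_cons, hset]
      exact ih (fun i hi => hL i (by simp [hi])) _

lemma setLoop_eq_chunks : ∀ (n : Nat) (r : List Char), r.length = n →
    (PySem.List.pyRange 3 (r.length : Int) 4).foldl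
        (fun (l : List Char) (i : Int) => l.set i.toNat '-') r
      = PySem.Chars.join [] (pvDash r []) := by
  intro n
  induction n using Nat.strong_induction_on with
  | _ n ih =>
    intro r hlen
    by_cases h : 4 ≤ r.length
    · rcases r with _ | ⟨a, _ | ⟨b, _ | ⟨c, _ | ⟨d, t⟩⟩⟩⟩ <;> simp at h
      have hstep : 4 ≤ ((a::b::c::d::t).length : Int) := by simp; omega
      rw [pyRange4_step _ hstep, List.foldl_cons]
      have hset3 : (a::b::c::d::t).set (3:Int).toNat '-' = a::b::c::'-'::t := by
        simp [List.set]
      rw [hset3]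
      have hnn : ∀ i ∈ PySem.List.pyRange 3 (((a::b::c::d::t).length : Int) - 4) 4, (0:Int) ≤ i := by
        intro i hi
        have := (PySem.List.mem_pyRange_iff_of_pos (by norm_num : (0:Int) < 4) i).mp hi
        omega
      rw [foldl_set_shift _ hnn]
      have hlt : ((a::b::c::d::t).length : Int) - 4 = (t.length : Int) := by
        simp only [List.length_cons]
        push_cast
        ring
      have hdrop : (a::b::c::d::t).drop 4 = t := rfl
      have htake : (a::b::c::d::t).take 3 = [a, b, c] := rfl
      have hRHS : pvDash (a::b::c::d::t) [] = ([a, b, c] ++ ['-']) :: pvDash t [] := by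
        rw [pvDash, if_pos (by simp), hdrop, htake, List.nil_append,
          pvDash_acc t.length t rfl [[a, b, c] ++ ['-']]]
        simp
      rw [hlt, ih t.length (by simp at hlen; omega) t rfl, hRHS, join_nil_cons]
      simp
    · rw [pyRange4_nil ((r.length : Nat) : Int) (by omega), List.foldl_nil,
        pvDash, if_neg h, List.nil_append, PySem.Chars.join_singleton]

-- ===== VERDICT (by name: the statement is the Claim_ definition above) =====
theorem first_reverse_spec : Claim_equal_first_reverse := by
  intro s _
  unfold Spec_first_reverse first_reverse first_reverse_alt
  simp only [PySem.Str.slice?_none_none_neg_one, Option.getD_some, String.toList_ofList,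
    PySem.List.foldl_append_singleton, List.nil_append]
  rw [setLoop_eq_chunks (s.toList.reverse ++ pyToken.toList).length _ rfl]
  rw [show ((0 : Int)) = ((0 : Nat) : Int) from rfl,
    pvChunksB_eq_dash (s.toList.reverse ++ pyToken.toList).length _ 0 rfl, List.drop_zero]
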